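-- pv_equiv track=rewrite | github.com/devFF/Python | Yandex_tasks/Find_the_shortest_words.py | sortest_words
-- ===== SOURCE A (Python) =====
-- def sortest_words(seq):
--     min_len = len(seq[0])
--     for i in range(1, len(seq)):
--         if len(seq[i]) < min_len:
--             min_len = len(seq[i])
--     words_list = []
--     for i in range(len(seq)):
--         if len(seq[i]) == min_len:
--             words_list.append(seq[i])
--     return " ".join(words_list)
-- ===== SOURCE B (Python) =====
-- def sortest_words(seq):
--     s = sorted(seq, key=len)
--     m = len(s[0])
--     return " ".join([w for w in s if len(w) == m])
-- ===== Notes on version B (the rewrite author's own statement) =====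
-- stated objective: simpler
-- what changed: Replaces the explicit min-scan loop and index-driven collection loop with a stable sort by length, reading the minimum off the sorted front and filtering it out in a comprehension.
import Mathlib
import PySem

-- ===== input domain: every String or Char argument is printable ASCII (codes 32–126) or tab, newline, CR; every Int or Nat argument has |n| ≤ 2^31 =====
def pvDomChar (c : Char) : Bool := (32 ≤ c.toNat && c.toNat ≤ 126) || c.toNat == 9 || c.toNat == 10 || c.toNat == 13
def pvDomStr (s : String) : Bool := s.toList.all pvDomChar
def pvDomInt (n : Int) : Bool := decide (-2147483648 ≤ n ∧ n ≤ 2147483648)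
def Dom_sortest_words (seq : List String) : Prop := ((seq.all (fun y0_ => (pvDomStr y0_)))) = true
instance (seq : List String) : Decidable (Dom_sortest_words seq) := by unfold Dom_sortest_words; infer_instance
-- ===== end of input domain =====

-- B replaces A's two index loops (min-scan, then collect) by one stable sort by length
-- followed by a filter; objective: simpler. On [] both A and B raise IndexError (outside Pre_).

-- ===== PORT A =====
def sortest_words (seq : List String) : String :=
  match seq with
  | [] => ""  -- Python: seq[0] raises IndexError here; excluded by Pre_
  | w0 :: _ =>
    let min_len := (PySem.List.pyRange 1 (PySem.List.len seq)).foldl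
      (fun m i => if PySem.Str.len (PySem.List.pyGetD seq i "") < m
                  then PySem.Str.len (PySem.List.pyGetD seq i "") else m)
      (PySem.Str.len w0)
    let words_list := (PySem.List.pyRange 0 (PySem.List.len seq)).foldl
      (fun acc i => if PySem.Str.len (PySem.List.pyGetD seq i "") == min_len
                    then acc ++ [PySem.List.pyGetD seq i ""] else acc) []
    PySem.Str.join " " words_list

-- ===== PORT B =====
def sortest_words_alt (seq : List String) : String :=
  let s := PySem.List.sorted seq (fun w => PySem.Str.len w)
  match s with
  | [] => ""  -- Python: s[0] raises IndexError here (seq empty); excluded by Pre_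
  | h :: _ =>
    PySem.Str.join " " (s.filter (fun w => PySem.Str.len w == PySem.Str.len h))

-- ===== PRECONDITION & SPEC =====
-- Python A (and B) raise IndexError on the empty list; Pre_ excludes exactly that input.
def Pre_sortest_words (seq : List String) : Prop := seq ≠ []
instance (seq : List String) : Decidable (Pre_sortest_words seq) := by
  unfold Pre_sortest_words; infer_instance
def pvWitness_sortest_words : List String := (["ab", "c", "de", "f"])

def Spec_sortest_words (seq : List String) (out : String) : Prop := out = sortest_words_alt seq
instance (seq : List String) (out : String) : Decidable (Spec_sortest_words seq out) := by
  unfold Spec_sortest_words; infer_instance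

-- ===== CLAIM (what is proved, stated in full; the proofs are below) =====
def Claim_equal_sortest_words : Prop := ∀ (seq : List String), Dom_sortest_words seq →
  Pre_sortest_words seq → Spec_sortest_words seq (sortest_words seq)

-- ===== LEMMAS AND PROOFS =====

-- A's first loop, as a structural fold over the tail.
theorem minfold_spec (rest : List String) (init : Int) :
    let m := rest.foldl (fun m w => if PySem.Str.len w < m then PySem.Str.len w else m) init
    (m ≤ init ∧ ∀ y ∈ rest, m ≤ PySem.Str.len y) ∧ (m = init ∨ ∃ y ∈ rest, PySem.Str.len y = m) := by
  induction rest generalizing init with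
  | nil => simp
  | cons w rest ih =>
    simp only [List.foldl_cons, List.mem_cons]
    rcases ih (if PySem.Str.len w < init then PySem.Str.len w else init) with ⟨⟨h1, h2⟩, h3⟩
    by_cases hw : PySem.Str.len w < init
    · simp only [if_pos hw] at h1 h2 h3 ⊢
      refine ⟨⟨by omega, ?_⟩, ?_⟩
      · rintro y (rfl | hy)
        · exact h1
        · exact h2 y hy
      · rcases h3 with h3 | ⟨y, hy, hey⟩
        · exact Or.inr ⟨w, Or.inl rfl, h3.symm⟩
        · exact Or.inr ⟨y, Or.inr hy, hey⟩
    · simp only [if_neg hw] at h1 h2 h3 ⊢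
      refine ⟨⟨h1, ?_⟩, ?_⟩
      · rintro y (rfl | hy)
        · omega
        · exact h2 y hy
      · rcases h3 with h3 | ⟨y, hy, hey⟩
        · exact Or.inl h3
        · exact Or.inr ⟨y, Or.inr hy, hey⟩

-- filtering away the inserted element
theorem filter_insertBy_neg {α : Type} (p : α → Bool) (b : α → α → Bool) (x : α) (ys : List α)
    (hx : p x = false) :
    (PySem.List.insertBy b x ys).filter p = ys.filter p := by
  induction ys with
  | nil => simp [PySem.List.insertBy, hx]
  | cons y ys ih =>
    by_cases hbe : b x y = true
    · simp [PySem.List.insertBy, hbe, hx]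
    · simp only [PySem.List.insertBy] at ih ⊢
      simp only [hbe, if_neg, Bool.not_eq_true] at *
      simp [List.filter_cons, ih]

-- inserting a minimal-length element into a length-sorted list puts it after all
-- other minimal-length elements
theorem filter_insertBy_min (m : Int) (x : String) (ys : List String)
    (hx : PySem.Str.len x = m)
    (hsorted : ys.Pairwise (fun a b => PySem.Str.len a ≤ PySem.Str.len b))
    (hmin : ∀ y ∈ ys, m ≤ PySem.Str.len y) :
    (PySem.List.insertBy (fun a b => decide (PySem.Str.len a < PySem.Str.len b)) x ys).filter
        (fun w => PySem.Str.len w == m) =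
      ys.filter (fun w => PySem.Str.len w == m) ++ [x] := by
  induction ys with
  | nil =>
    simp only [PySem.List.insertBy, List.filter_nil, List.nil_append]
    rw [List.filter_cons_of_pos (p := fun w => PySem.Str.len w == m) (by simpa using hx),
      List.filter_nil]
  | cons y ys ih =>
    rcases List.pairwise_cons.mp hsorted with ⟨hy_le, hsorted'⟩
    by_cases hlt : PySem.Str.len x < PySem.Str.len y
    · -- x goes in front; y and everything after are longer than m, so the filter of y::ys is []
      have h0 : List.filter (fun w => PySem.Str.len w == m) (y :: ys) = [] :=
        List.filter_eq_nil_iff.mpr (by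
          intro z hz
          rcases List.mem_cons.mp hz with rfl | hz
          · simp only [beq_iff_eq]; omega
          · have := hy_le z hz; simp only [beq_iff_eq]; omega)
      simp only [PySem.List.insertBy, decide_eq_true_eq, if_pos hlt]
      rw [List.filter_cons_of_pos (p := fun w => PySem.Str.len w == m) (by simpa using hx), h0]
      rfl
    · -- key y ≤ key x = m and m ≤ key y, so key y = m
      have hym : PySem.Str.len y = m := by
        have := hmin y List.mem_cons_self
        omega
      simp only [PySem.List.insertBy, decide_eq_true_eq, if_neg hlt]
      rw [List.filter_cons_of_pos (p := fun w => PySem.Str.len w == m) (by simpa using hym),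
        List.filter_cons_of_pos (p := fun w => PySem.Str.len w == m) (by simpa using hym),
        ih hsorted' (fun z hz => hmin z (List.mem_cons_of_mem _ hz))]
      rfl

-- filtering the minimum-length words commutes with the stable sort
theorem filter_sorted_min (seq : List String) (m : Int)
    (hmin : ∀ y ∈ seq, m ≤ PySem.Str.len y) :
    (PySem.List.sorted seq (fun w => PySem.Str.len w)).filter (fun w => PySem.Str.len w == m) =
      seq.filter (fun w => PySem.Str.len w == m) := by
  induction seq using List.reverseRecOn with
  | nil => simp [PySem.List.sorted_eq_foldl_insertBy]
  | append_singleton xs x ih =>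
    have hsortapp :
        PySem.List.sorted (xs ++ [x]) (fun w => PySem.Str.len w) =
          PySem.List.insertBy (fun a b => decide (PySem.Str.len a < PySem.Str.len b)) x
            (PySem.List.sorted xs (fun w => PySem.Str.len w)) := by
      rw [PySem.List.sorted_eq_foldl_insertBy, PySem.List.sorted_eq_foldl_insertBy,
        List.foldl_append]
      rfl
    have hmin' : ∀ y ∈ xs, m ≤ PySem.Str.len y := fun y hy =>
      hmin y (List.mem_append_left _ hy)
    have ihx := ih hmin'
    rw [hsortapp]
    by_cases hx : PySem.Str.len x = m
    · have hx1 : List.filter (fun w => PySem.Str.len w == m) [x] = [x] := by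
        rw [List.filter_cons_of_pos (p := fun w => PySem.Str.len w == m) (by simpa using hx),
          List.filter_nil]
      rw [filter_insertBy_min m x _ hx (PySem.List.sorted_pairwise xs _)
        (fun y hy => hmin' y ((PySem.List.mem_sorted xs _ false y).mp hy))]
      rw [ihx, List.filter_append, hx1]
    · have hxf : ((fun w => PySem.Str.len w == m) x) = false := by
        simp only [beq_eq_false_iff_ne, ne_eq]; simpa using hx
      have hx0 : List.filter (fun w => PySem.Str.len w == m) [x] = [] := by
        rw [List.filter_cons_of_neg (p := fun w => PySem.Str.len w == m) (by simpa using hx),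
          List.filter_nil]
      rw [filter_insertBy_neg (fun w => PySem.Str.len w == m)
          (fun a b => decide (PySem.Str.len a < PySem.Str.len b)) x
          (PySem.List.sorted xs (fun w => PySem.Str.len w)) hxf,
        ihx, List.filter_append, hx0, List.append_nil]

-- ===== VERDICT (by name: the statement is the Claim_ definition above) =====
theorem sortest_words_spec : Claim_equal_sortest_words := by
  intro seq _ hpre
  unfold Spec_sortest_words
  match hseq : seq with
  | [] => exact absurd rfl hpre
  | w0 :: rest =>
    -- A's two range loops, rewritten as structural folds over the list
    have hlen : PySem.List.len (w0 :: rest) = ((w0 :: rest).length : Int) := rfl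
    have hminloop :
        (PySem.List.pyRange 1 (PySem.List.len (w0 :: rest))).foldl
          (fun m i => if PySem.Str.len (PySem.List.pyGetD (w0 :: rest) i "") < m
                      then PySem.Str.len (PySem.List.pyGetD (w0 :: rest) i "") else m)
          (PySem.Str.len w0) =
        rest.foldl (fun m w => if PySem.Str.len w < m then PySem.Str.len w else m)
          (PySem.Str.len w0) := by
      have := PySem.List.foldl_pyRange_pyGetD (w0 :: rest) ""
        (fun m w => if PySem.Str.len w < m then PySem.Str.len w else m)
        (PySem.Str.len w0) (a := 1) (by norm_num)
      simpa using this
    set mA := rest.foldl (fun m w => if PySem.Str.len w < m then PySem.Str.len w else m)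
      (PySem.Str.len w0) with hmA
    have hwordsloop :
        (PySem.List.pyRange 0 (PySem.List.len (w0 :: rest))).foldl
          (fun acc i => if PySem.Str.len (PySem.List.pyGetD (w0 :: rest) i "") == mA
                        then acc ++ [PySem.List.pyGetD (w0 :: rest) i ""] else acc)
          ([] : List String) =
        (w0 :: rest).filter (fun w => PySem.Str.len w == mA) := by
      have := PySem.List.foldl_pyRange_pyGetD (w0 :: rest) ""
        (fun (acc : List String) w => if PySem.Str.len w == mA then acc ++ [w] else acc)
        ([] : List String) (a := 0) (by norm_num)
      rw [show (0 : Int).toNat = 0 from rfl, List.drop_zero] at this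
      rw [this]
      simpa using PySem.List.foldl_append_if (fun w => PySem.Str.len w == mA) id
        (w0 :: rest) []
    -- properties of A's minimum
    rcases minfold_spec rest (PySem.Str.len w0) with ⟨⟨hinit, hrest⟩, hach⟩
    have hminall : ∀ y ∈ w0 :: rest, mA ≤ PySem.Str.len y := by
      intro y hy
      rcases List.mem_cons.mp hy with rfl | hy
      · exact hinit
      · exact hrest y hy
    have hachieved : ∃ y ∈ w0 :: rest, PySem.Str.len y = mA := by
      rcases hach with h | ⟨y, hy, hey⟩
      · exact ⟨w0, List.mem_cons_self, h.symm⟩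
      · exact ⟨y, List.mem_cons_of_mem _ hy, hey⟩
    -- B's sorted list is nonempty; its head has A's minimum length
    rcases hs : PySem.List.sorted (w0 :: rest) (fun w => PySem.Str.len w) with _ | ⟨h, t⟩
    · exact absurd ((PySem.List.sorted_eq_nil_iff _ _ _).mp hs) (by simp)
    · have hhead_le : ∀ y ∈ w0 :: rest, PySem.Str.len h ≤ PySem.Str.len y :=
        PySem.List.key_head_sorted_le (w0 :: rest) (fun w => PySem.Str.len w) hs
      have hh_mem : h ∈ w0 :: rest := by
        have : h ∈ PySem.List.sorted (w0 :: rest) (fun w => PySem.Str.len w) := by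
          rw [hs]; exact List.mem_cons_self
        exact (PySem.List.mem_sorted _ _ _ _).mp this
      have hheq : PySem.Str.len h = mA := by
        rcases hachieved with ⟨y, hy, hey⟩
        have h1 := hhead_le y hy
        have h2 := hminall h hh_mem
        omega
      -- assemble
      show PySem.Str.join " " _ = sortest_words_alt (w0 :: rest)
      unfold sortest_words_alt
      simp only [hs]
      rw [hminloop, hwordsloop, hheq, ← hs,
        filter_sorted_min (w0 :: rest) mA hminall]
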